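-- pv_equiv track=rewrite | github.com/yxiao1996/flask-cloudwatch-metric | flask_cloudwatch_metric/__init__.py | _get_batch_metrics
-- ===== SOURCE A (Python) =====
-- def _get_batch_metrics(metrics_buffer):
--     batch_metrics = []
--     if len(metrics_buffer) <= 20:
--         while len(metrics_buffer) > 0:
--             batch_metrics.append(metrics_buffer.pop())
--     else:
--         # Create a batch of metrics with size 20, due to the limitation of CloudWatch client:
--         # https://flask.palletsprojects.com/en/2.0.x/api/#flask.Flask.after_request
--         for i in range(20):
--             batch_metrics.append(metrics_buffer.pop())
--     return batch_metrics
-- ===== SOURCE B (Python) =====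
-- def _get_batch_metrics(metrics_buffer):
--     n = min(len(metrics_buffer), 20)
--     start = len(metrics_buffer) - n
--     batch_metrics = metrics_buffer[start:][::-1]
--     del metrics_buffer[start:]
--     return batch_metrics
-- ===== Notes on version B (the rewrite author's own statement) =====
-- stated objective: simpler
-- what changed: Replaces the two branches with pop-loops by computing n = min(len, 20) once and taking one reversed slice of the last n elements plus one bulk delete.
import Mathlib
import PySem

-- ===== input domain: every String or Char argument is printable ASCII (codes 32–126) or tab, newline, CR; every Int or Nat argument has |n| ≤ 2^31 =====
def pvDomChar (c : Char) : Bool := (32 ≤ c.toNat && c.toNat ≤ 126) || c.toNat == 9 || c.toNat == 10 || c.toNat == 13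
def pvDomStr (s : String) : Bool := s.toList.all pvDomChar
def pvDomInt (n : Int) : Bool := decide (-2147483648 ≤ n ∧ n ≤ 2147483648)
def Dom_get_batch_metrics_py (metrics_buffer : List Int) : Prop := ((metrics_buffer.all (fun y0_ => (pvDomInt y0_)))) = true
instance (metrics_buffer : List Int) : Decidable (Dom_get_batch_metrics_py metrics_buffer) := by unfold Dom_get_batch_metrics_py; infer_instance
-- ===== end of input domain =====

-- B replaces A's two pop-loop branches by one reversed slice of the last min(len,20) elements (simpler).
-- A also mutates metrics_buffer in place (pops the returned elements); B performs the same mutation via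
-- one bulk 'del'; the equivalence proved here is about the RETURN value.

-- ===== PORT A =====
-- while len(metrics_buffer) > 0: batch_metrics.append(metrics_buffer.pop())
def popWhileA (buf acc : List Int) : List Int :=
  if h : buf.length > 0 then
    popWhileA buf.dropLast (acc ++ [buf.getLast (by intro hn; simp [hn] at h)])
  else acc
termination_by buf.length
decreasing_by simpa using Nat.sub_lt h Nat.one_pos

-- for i in range(20): batch_metrics.append(metrics_buffer.pop())   (len > 20 here, so pop never raises)
def popForA : Nat → List Int → List Int → List Int
  | 0, _, acc => acc
  | k + 1, buf, acc => popForA k buf.dropLast (acc ++ [buf.getLast!])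

def get_batch_metrics_py (metrics_buffer : List Int) : List Int :=
  let batch_metrics : List Int := []
  if metrics_buffer.length ≤ 20 then
    popWhileA metrics_buffer batch_metrics
  else
    popForA 20 metrics_buffer batch_metrics

-- ===== PORT B =====
def get_batch_metrics_py_alt (metrics_buffer : List Int) : List Int :=
  let n : Nat := min metrics_buffer.length 20
  let start : Nat := metrics_buffer.length - n
  (PySem.List.slice metrics_buffer (some (start : Int)) none).reverse

-- ===== PRECONDITION & SPEC =====
def Spec_get_batch_metrics_py (metrics_buffer : List Int) (out : List Int) : Prop := out = get_batch_metrics_py_alt metrics_buffer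
instance (metrics_buffer : List Int) (out : List Int) : Decidable (Spec_get_batch_metrics_py metrics_buffer out) := by unfold Spec_get_batch_metrics_py; infer_instance

-- ===== CLAIM (what is proved, stated in full; the proofs are below) =====
def Claim_equal_get_batch_metrics_py : Prop := ∀ (metrics_buffer : List Int), Dom_get_batch_metrics_py metrics_buffer → Spec_get_batch_metrics_py metrics_buffer (get_batch_metrics_py metrics_buffer)

-- ===== LEMMAS AND PROOFS =====
theorem popWhileA_eq (buf : List Int) : ∀ acc, popWhileA buf acc = acc ++ buf.reverse := by
  induction buf using List.reverseRecOn with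
  | nil => intro acc; rw [popWhileA]; simp
  | append_singleton ys x ih =>
      intro acc
      rw [popWhileA]
      simp [ih]

theorem getLast!_append_singleton (ys : List Int) (x : Int) : (ys ++ [x]).getLast! = x := by
  induction ys with
  | nil => rfl
  | cons a t ih => simpa [List.getLast!] using ih

theorem popForA_eq : ∀ (k : Nat) (buf acc : List Int), k ≤ buf.length →
    popForA k buf acc = acc ++ (buf.drop (buf.length - k)).reverse := by
  intro k
  induction k with
  | zero => intro buf acc _; simp [popForA]
  | succ k ih =>
      intro buf acc hk
      rcases List.eq_nil_or_concat buf with rfl | ⟨ys, x, rfl⟩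
      · simp at hk
      · simp only [List.concat_eq_append] at hk ⊢
        have hlen : (ys ++ [x]).length = ys.length + 1 := by simp
        have hk' : k ≤ ys.length := by omega
        rw [popForA]
        rw [List.dropLast_concat, getLast!_append_singleton, ih ys _ hk']
        have hdrop : (ys ++ [x]).drop ((ys ++ [x]).length - (k + 1)) =
            ys.drop (ys.length - k) ++ [x] := by
          rw [show (ys ++ [x]).length - (k + 1) = ys.length - k by simp]
          rw [List.drop_append_of_le_length (Nat.sub_le _ _)]
        rw [hdrop]
        simp

-- ===== VERDICT (by name: the statement is the Claim_ definition above) =====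
theorem get_batch_metrics_py_spec : Claim_equal_get_batch_metrics_py := by
  intro buf _
  unfold Spec_get_batch_metrics_py get_batch_metrics_py get_batch_metrics_py_alt
  by_cases h : buf.length ≤ 20
  · have hn : min buf.length 20 = buf.length := by omega
    simp only [if_pos h, hn, Nat.sub_self, popWhileA_eq]
    simp
  · have hn : min buf.length 20 = 20 := by omega
    simp only [if_neg h, hn]
    rw [popForA_eq 20 buf [] (by omega)]
    simp [PySem.List.slice_from_natCast]
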